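-- pv_equiv track=rewrite | github.com/shanevcantwell/prompt-prix | prompt_prix/parsers.py | parse_models_input
-- ===== SOURCE A (Python) =====
-- def parse_models_input(models_text: str) -> list[str]:
--     """Parse newline or comma-separated model list."""
--     models = []
--     for line in models_text.strip().split("\n"):
--         for item in line.split(","):
--             item = item.strip()
--             if item:
--                 models.append(item)
--     return models
-- ===== SOURCE B (Python) =====
-- def parse_models_input(models_text: str) -> list[str]:
--     """Parse newline or comma-separated model list (single-pass character scan)."""
--     models = []
--     cur = []
--     for ch in models_text + "\n":
--         if ch == "\n" or ch == ",":
--             tok = "".join(cur).strip()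
--             if tok:
--                 models.append(tok)
--             cur = []
--         else:
--             cur.append(ch)
--     return models
-- ===== Notes on version B (the rewrite author's own statement) =====
-- stated objective: alternative
-- what changed: Replaces the strip-then-split-on-newlines-then-split-on-commas nested loops by a single left-to-right character scan that maintains a current-token accumulator and flushes a stripped nonempty token at each delimiter.
import Mathlib
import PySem

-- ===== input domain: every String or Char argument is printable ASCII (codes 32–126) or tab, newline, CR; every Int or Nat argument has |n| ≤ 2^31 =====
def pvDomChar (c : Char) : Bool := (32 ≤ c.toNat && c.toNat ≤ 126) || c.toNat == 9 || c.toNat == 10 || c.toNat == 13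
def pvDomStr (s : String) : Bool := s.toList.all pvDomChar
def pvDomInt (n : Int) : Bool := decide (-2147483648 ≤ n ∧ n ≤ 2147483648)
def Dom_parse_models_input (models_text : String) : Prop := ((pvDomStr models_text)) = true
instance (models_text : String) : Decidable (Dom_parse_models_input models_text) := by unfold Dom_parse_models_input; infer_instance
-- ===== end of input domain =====

-- B replaces the strip-then-split-on-newlines-then-split-on-commas nested loops by a single character scan
-- with a current-token accumulator (objective: alternative decomposition, same cost).

-- ===== PORT A =====
def parse_models_input (models_text : String) : List String :=
  (match PySem.Str.split? (PySem.Str.strip models_text) "\n" with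
   | some lines => lines
   | none => []).foldl
    (fun models line =>
      (match PySem.Str.split? line "," with
       | some items => items
       | none => []).foldl
        (fun models item =>
          let item := PySem.Str.strip item
          if item ≠ "" then models ++ [item] else models)
        models)
    []

-- ===== PORT B =====
-- B-side helper: the body of B's for-loop (one scanned character).
def pvStep (st : List String × List Char) (ch : Char) : List String × List Char :=
  if ch = '\n' ∨ ch = ',' then
    let tok := PySem.Str.strip (String.ofList st.2)
    (if tok ≠ "" then st.1 ++ [tok] else st.1, [])
  else (st.1, st.2 ++ [ch])

def parse_models_input_alt (models_text : String) : List String :=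
  ((models_text.toList ++ ['\n']).foldl pvStep ([], [])).1

-- ===== PRECONDITION & SPEC =====
def Spec_parse_models_input (models_text : String) (out : List String) : Prop := out = parse_models_input_alt models_text
instance (models_text : String) (out : List String) : Decidable (Spec_parse_models_input models_text out) := by unfold Spec_parse_models_input; infer_instance

-- ===== CLAIM (what is proved, stated in full; the proofs are below) =====
def Claim_equal_parse_models_input : Prop := ∀ (models_text : String), Dom_parse_models_input models_text → Spec_parse_models_input models_text (parse_models_input models_text)

-- ===== LEMMAS AND PROOFS =====

-- A delimiter character: newline or comma.
def pvIsD (c : Char) : Bool := c == '\n' || c == ','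

-- apply f to the first piece
def pvMF (f : List Char → List Char) : List (List Char) → List (List Char)
  | [] => []
  | t :: ts => f t :: ts

-- apply f to the last piece
def pvML (f : List Char → List Char) : List (List Char) → List (List Char)
  | [] => []
  | [t] => [f t]
  | t :: t' :: ts => t :: pvML f (t' :: ts)

-- split on every character satisfying p (pieces kept, possibly empty)
def pvSplit (p : Char → Bool) : List Char → List (List Char)
  | [] => [[]]
  | c :: rest => if p c then [] :: pvSplit p rest else pvMF (c :: ·) (pvSplit p rest)

-- strip every piece, drop the empty ones, pack as strings
def pvToks (l : List (List Char)) : List String :=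
  ((l.map PySem.Chars.strip).filter (fun t => !t.isEmpty)).map String.ofList

theorem pvMF_id (l : List (List Char)) : pvMF (fun t => t) l = l := by
  cases l <;> simp [pvMF]

theorem pvMF_congr {f g : List Char → List Char} (h : ∀ t, f t = g t) (l : List (List Char)) :
    pvMF f l = pvMF g l := by
  cases l <;> simp [pvMF, h]

theorem pvMF_pvMF (f g : List Char → List Char) (l : List (List Char)) :
    pvMF f (pvMF g l) = pvMF (fun t => f (g t)) l := by
  cases l <;> simp [pvMF]

theorem pvSplit_ne_nil (p : Char → Bool) (l : List Char) : pvSplit p l ≠ [] := by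
  induction l with
  | nil => simp [pvSplit]
  | cons c rest ih =>
    by_cases hp : p c
    · simp [pvSplit, hp]
    · cases h : pvSplit p rest with
      | nil => exact absurd h ih
      | cons t ts => simp [pvSplit, hp, h, pvMF]

theorem pvMF_append_of_ne_nil (f : List Char → List Char) {l : List (List Char)}
    (h : l ≠ []) (ys : List (List Char)) : pvMF f (l ++ ys) = pvMF f l ++ ys := by
  cases l with
  | nil => exact absurd rfl h
  | cons t ts => simp [pvMF]

theorem pvML_cons_of_ne_nil (f : List Char → List Char) (t : List Char) {l : List (List Char)}
    (h : l ≠ []) : pvML f (t :: l) = t :: pvML f l := by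
  cases l with
  | nil => exact absurd rfl h
  | cons t' ts => simp [pvML]

theorem pvMF_pvML_comm {f g : List Char → List Char} (h : ∀ t, f (g t) = g (f t))
    (l : List (List Char)) : pvMF f (pvML g l) = pvML g (pvMF f l) := by
  cases l with
  | nil => simp [pvMF, pvML]
  | cons t ts =>
    cases ts with
    | nil => simp [pvMF, pvML, h]
    | cons t' ts' => simp [pvMF, pvML_cons_of_ne_nil]

-- splitOn.go with enough fuel computes pvSplit
theorem pv_go_eq (d : Char) : ∀ (s : List Char) (fuel : Nat) (cur : List Char)
    (acc : List (List Char)), s.length < fuel →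
    PySem.Chars.splitOn.go [d] fuel s cur acc
      = acc.reverse ++ pvMF (fun t => cur.reverse ++ t) (pvSplit (· == d) s) := by
  intro s
  induction s with
  | nil =>
    intro fuel cur acc h
    cases fuel with
    | zero => omega
    | succ f => simp [PySem.Chars.splitOn.go, pvSplit, pvMF]
  | cons c rest ih =>
    intro fuel cur acc h
    cases fuel with
    | zero => omega
    | succ f =>
      by_cases hc : c = d
      · have hpre : [d].isPrefixOf (c :: rest) = true := by
          simp [List.isPrefixOf, hc]
        simp only [PySem.Chars.splitOn.go, hpre, if_true]
        have := ih f [] (cur.reverse :: acc) (by simpa using Nat.lt_of_succ_lt_succ h)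
        simp only [List.length_cons, List.length_nil, List.drop_succ_cons, List.drop_zero] at this ⊢
        rw [this]
        have hcd : (c == d) = true := by simp [hc]
        cases h' : pvSplit (· == d) rest <;> simp [pvSplit, hcd, pvMF, h']
      · have hpre : [d].isPrefixOf (c :: rest) = false := by
          simp [List.isPrefixOf]
          exact fun h' => absurd h'.symm hc
        simp only [PySem.Chars.splitOn.go, hpre]
        have := ih f (c :: cur) acc (by simpa using Nat.lt_of_succ_lt_succ h)
        simp only [Bool.false_eq_true, if_false]
        rw [this]
        have hcd : (c == d) = false := by simp [hc]
        simp only [pvSplit, hcd, Bool.false_eq_true, if_false, pvMF_pvMF]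
        congr 1
        apply pvMF_congr
        intro t
        simp

theorem pv_splitOn_eq (d : Char) (s : List Char) :
    PySem.Chars.splitOn s [d] = pvSplit (· == d) s := by
  unfold PySem.Chars.splitOn
  rw [pv_go_eq d s (s.length + 1) [] [] (by omega)]
  simp [pvMF_id]

theorem pv_flatMap_split (p q : Char → Bool) (l : List Char) :
    (pvSplit p l).flatMap (pvSplit q) = pvSplit (fun c => p c || q c) l := by
  induction l with
  | nil => simp [pvSplit]
  | cons c rest ih =>
    by_cases hp : p c
    · simp [pvSplit, hp, ih]
    · cases h : pvSplit p rest with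
      | nil => exact absurd h (pvSplit_ne_nil p rest)
      | cons t ts =>
        rw [h] at ih
        by_cases hq : q c
        · simp only [pvSplit, hp, hq, Bool.false_eq_true, if_false, Bool.false_or, if_true, h,
            pvMF, List.flatMap_cons] at ih ⊢
          rw [← ih]
          rfl
        · rw [List.flatMap_cons] at ih
          have hl : pvSplit p (c :: rest) = (c :: t) :: ts := by
            simp [pvSplit, hp, h, pvMF]
          have hg : pvSplit q (c :: t) = pvMF (fun x => c :: x) (pvSplit q t) := by
            simp [pvSplit, hq]
          have hcomb : pvSplit (fun c => p c || q c) (c :: rest)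
              = pvMF (fun x => c :: x) (pvSplit (fun c => p c || q c) rest) := by
            simp [pvSplit, hp, hq]
          rw [hl, List.flatMap_cons, hg, hcomb, ← ih,
            pvMF_append_of_ne_nil _ (pvSplit_ne_nil q t)]

theorem pv_strip_nil : PySem.Chars.strip ([] : List Char) = [] := by
  simp [PySem.Chars.strip, PySem.Chars.lstrip, PySem.Chars.rstrip]

theorem pv_strip_cons_space {c : Char} (h : PySem.Chars.isspace c = true) (t : List Char) :
    PySem.Chars.strip (c :: t) = PySem.Chars.strip t := by
  simp [PySem.Chars.strip, PySem.Chars.lstrip, List.dropWhile_cons, h]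

theorem pv_rstrip_snoc_space {c : Char} (h : PySem.Chars.isspace c = true) (t : List Char) :
    PySem.Chars.rstrip (t ++ [c]) = PySem.Chars.rstrip t := by
  simp [PySem.Chars.rstrip, List.dropWhile_cons, h]

theorem pv_strip_snoc_space {c : Char} (h : PySem.Chars.isspace c = true) (t : List Char) :
    PySem.Chars.strip (t ++ [c]) = PySem.Chars.strip t := by
  unfold PySem.Chars.strip
  unfold PySem.Chars.lstrip
  rw [List.dropWhile_append]
  by_cases he : (List.dropWhile PySem.Chars.isspace t).isEmpty
  · simp [he, List.dropWhile_cons, h, List.isEmpty_iff.mp he,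
      PySem.Chars.rstrip]
  · simp only [he, Bool.false_eq_true, if_false]
    exact pv_rstrip_snoc_space h _

theorem pvToks_cons (t : List Char) (l : List (List Char)) :
    pvToks (t :: l) =
      (if PySem.Chars.strip t = [] then [] else [String.ofList (PySem.Chars.strip t)]) ++ pvToks l := by
  simp only [pvToks, List.map_cons, List.filter_cons]
  by_cases h : PySem.Chars.strip t = []
  · simp [h]
  · simp [h, List.isEmpty_iff]

theorem pvToks_append (l1 l2 : List (List Char)) : pvToks (l1 ++ l2) = pvToks l1 ++ pvToks l2 := by
  simp [pvToks]

theorem pvToks_mf {f : List Char → List Char}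
    (hf : ∀ t, PySem.Chars.strip (f t) = PySem.Chars.strip t) (l : List (List Char)) :
    pvToks (pvMF f l) = pvToks l := by
  cases l with
  | nil => rfl
  | cons t ts => simp [pvMF, pvToks_cons, hf]

theorem pvToks_ml {f : List Char → List Char}
    (hf : ∀ t, PySem.Chars.strip (f t) = PySem.Chars.strip t) :
    ∀ l : List (List Char), pvToks (pvML f l) = pvToks l := by
  intro l
  induction l with
  | nil => rfl
  | cons t ts ih =>
    cases ts with
    | nil => simp [pvML, pvToks_cons, hf]
    | cons t' ts' => simp only [pvML, pvToks_cons, ih]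

-- splitting after snoc
theorem pvSplit_snoc (p : Char → Bool) (c : Char) : ∀ l : List Char,
    pvSplit p (l ++ [c]) =
      if p c then pvSplit p l ++ [[]] else pvML (fun t => t ++ [c]) (pvSplit p l) := by
  intro l
  induction l with
  | nil => by_cases hc : p c <;> simp [pvSplit, hc, pvMF, pvML]
  | cons d rest ih =>
    by_cases hd : p d
    · by_cases hc : p c
      · simp [pvSplit, hd, hc, ih]
      · simp only [List.cons_append, pvSplit, hd, if_true, ih, hc, Bool.false_eq_true, if_false]
        rw [pvML_cons_of_ne_nil _ _ (pvSplit_ne_nil p rest)]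
    · by_cases hc : p c
      · simp only [List.cons_append, pvSplit, hd, Bool.false_eq_true, if_false, ih, hc, if_true]
        rw [pvMF_append_of_ne_nil _ (pvSplit_ne_nil p rest)]
      · simp only [List.cons_append, pvSplit, hd, Bool.false_eq_true, if_false, ih, hc]
        rw [pvMF_pvML_comm (by intro t; simp)]

-- leading whitespace does not change the token list
theorem pv_lstrip_toks : ∀ l : List Char,
    pvToks (pvSplit pvIsD (PySem.Chars.lstrip l)) = pvToks (pvSplit pvIsD l) := by
  intro l
  induction l with
  | nil => rfl
  | cons c rest ih =>
    by_cases hs : PySem.Chars.isspace c = true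
    · have h1 : PySem.Chars.lstrip (c :: rest) = PySem.Chars.lstrip rest := by
        simp [PySem.Chars.lstrip, List.dropWhile_cons, hs]
      rw [h1, ih]
      by_cases hd : pvIsD c = true
      · simp [pvSplit, hd, pvToks_cons, pv_strip_nil]
      · simp only [pvSplit, hd, Bool.false_eq_true, if_false]
        exact (pvToks_mf (fun t => pv_strip_cons_space hs t) _).symm
    · have h1 : PySem.Chars.lstrip (c :: rest) = c :: rest := by
        simp [PySem.Chars.lstrip, List.dropWhile_cons, hs]
      rw [h1]

-- trailing whitespace does not change the token list
theorem pv_rstrip_toks : ∀ l : List Char,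
    pvToks (pvSplit pvIsD (PySem.Chars.rstrip l)) = pvToks (pvSplit pvIsD l) := by
  intro l
  induction l using List.reverseRecOn with
  | nil => rfl
  | append_singleton l c ih =>
    by_cases hs : PySem.Chars.isspace c = true
    · rw [pv_rstrip_snoc_space hs, ih]
      rw [pvSplit_snoc]
      by_cases hd : pvIsD c = true
      · simp [hd, pvToks_append, pvToks_cons, pv_strip_nil, pvToks]
      · simp only [hd, Bool.false_eq_true, if_false]
        exact (pvToks_ml (fun t => pv_strip_snoc_space hs t) _).symm
    · have h1 : PySem.Chars.rstrip (l ++ [c]) = l ++ [c] := by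
        simp [PySem.Chars.rstrip, List.dropWhile_cons, hs]
      rw [h1]

theorem pv_strip_toks (l : List Char) :
    pvToks (pvSplit pvIsD (PySem.Chars.strip l)) = pvToks (pvSplit pvIsD l) := by
  unfold PySem.Chars.strip
  rw [pv_rstrip_toks, pv_lstrip_toks]

theorem pv_ofList_eq_empty_iff (l : List Char) : (String.ofList l = "") ↔ l = [] := by
  constructor
  · intro h
    have := congrArg String.toList h
    simpa using this
  · rintro rfl; rfl

theorem pv_str_strip_ofList (l : List Char) :
    PySem.Str.strip (String.ofList l) = String.ofList (PySem.Chars.strip l) := by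
  simp [PySem.Str.strip]

-- the scan loop of B computes the token list
theorem pv_scan_spec : ∀ (l : List Char) (ms : List String) (cur : List Char),
    ((l ++ ['\n']).foldl pvStep (ms, cur)).1
      = ms ++ pvToks (pvMF (fun t => cur ++ t) (pvSplit pvIsD l)) := by
  intro l
  induction l with
  | nil =>
    intro ms cur
    simp only [List.nil_append, List.foldl_cons, List.foldl_nil, pvStep, if_pos (Or.inl rfl)]
    rw [pv_str_strip_ofList]
    simp only [pvSplit, pvMF, List.append_nil, pvToks_cons]
    by_cases h : PySem.Chars.strip cur = []
    · simp [h, pv_ofList_eq_empty_iff, pvToks]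
    · simp [h, pv_ofList_eq_empty_iff, pvToks]
  | cons c rest ih =>
    intro ms cur
    by_cases hd : c = '\n' ∨ c = ','
    · have hD : pvIsD c = true := by
        rcases hd with h | h <;> simp [pvIsD, h]
      simp only [List.cons_append, List.foldl_cons, pvStep, if_pos hd]
      rw [ih]
      rw [pvMF_congr (f := fun t => [] ++ t) (g := fun t => t) (by intro t; simp), pvMF_id]
      rw [pv_str_strip_ofList]
      have hsp : pvSplit pvIsD (c :: rest) = [] :: pvSplit pvIsD rest := by simp [pvSplit, hD]
      rw [hsp, show pvMF (fun t => cur ++ t) ([] :: pvSplit pvIsD rest)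
            = cur :: pvSplit pvIsD rest by simp [pvMF], pvToks_cons]
      by_cases h : PySem.Chars.strip cur = []
      · simp [h, pv_ofList_eq_empty_iff]
      · simp [h, pv_ofList_eq_empty_iff]
    · have hD : pvIsD c = false := by
        simp [pvIsD]
        constructor
        · exact fun h => absurd h (fun h' => hd (Or.inl h'))
        · exact fun h => absurd h (fun h' => hd (Or.inr h'))
      simp only [List.cons_append, List.foldl_cons, pvStep, if_neg hd]
      rw [ih]
      simp only [pvSplit, hD, Bool.false_eq_true, if_false, pvMF_pvMF]
      congr 2
      apply pvMF_congr
      intro t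
      simp

-- B equals the token list of the combined split
theorem pv_alt_eq (s : String) :
    parse_models_input_alt s = pvToks (pvSplit pvIsD s.toList) := by
  unfold parse_models_input_alt
  rw [pv_scan_spec]
  rw [pvMF_congr (g := fun t => t) (by intro t; simp)]
  rw [pvMF_id]
  simp

-- the inner loop of A
theorem pv_innerA : ∀ (items : List (List Char)) (ms : List String),
    (items.map String.ofList).foldl
      (fun models item =>
        let item := PySem.Str.strip item
        if item ≠ "" then models ++ [item] else models) ms
      = ms ++ pvToks items := by
  intro items
  induction items with
  | nil => intro ms; simp [pvToks]
  | cons t ts ih =>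
    intro ms
    simp only [List.map_cons, List.foldl_cons]
    rw [ih, pv_str_strip_ofList, pvToks_cons]
    by_cases h : PySem.Chars.strip t = []
    · simp [h, pv_ofList_eq_empty_iff]
    · simp [h, pv_ofList_eq_empty_iff]

-- a comma split wrapped back into strings, as A's inner match sees it
theorem pv_split_comma (l : List Char) :
    (match PySem.Str.split? (String.ofList l) "," with
     | some items => items
     | none => []) = (pvSplit (· == ',') l).map String.ofList := by
  simp only [PySem.Str.split?, String.toList_ofList]
  have : PySem.Chars.split? l [','] = some (PySem.Chars.splitOn l [',']) := by
    simp [PySem.Chars.split?]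
  rw [show (("," : String).toList) = [','] from rfl, this, pv_splitOn_eq]
  simp

-- the outer loop of A
theorem pv_outerA : ∀ (lines : List (List Char)) (ms : List String),
    (lines.map String.ofList).foldl
      (fun models line =>
        (match PySem.Str.split? line "," with
         | some items => items
         | none => []).foldl
          (fun models item =>
            let item := PySem.Str.strip item
            if item ≠ "" then models ++ [item] else models)
          models) ms
      = ms ++ pvToks (lines.flatMap (pvSplit (· == ','))) := by
  intro lines
  induction lines with
  | nil => intro ms; simp [pvToks]
  | cons L Ls ih =>
    intro ms
    simp only [List.map_cons, List.foldl_cons]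
    rw [pv_split_comma, pv_innerA, ih, List.flatMap_cons, pvToks_append, List.append_assoc]

theorem pv_a_eq (s : String) :
    parse_models_input s = pvToks (pvSplit pvIsD s.toList) := by
  unfold parse_models_input
  have h1 : PySem.Str.strip s = String.ofList (PySem.Chars.strip s.toList) := rfl
  have h2 : (match PySem.Str.split? (PySem.Str.strip s) "\n" with
             | some lines => lines
             | none => []) = (pvSplit (· == '\n') (PySem.Chars.strip s.toList)).map String.ofList := by
    rw [h1]
    simp only [PySem.Str.split?, String.toList_ofList]
    have : PySem.Chars.split? (PySem.Chars.strip s.toList) ['\n']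
        = some (PySem.Chars.splitOn (PySem.Chars.strip s.toList) ['\n']) := by
      simp [PySem.Chars.split?]
    rw [show (("\n" : String).toList) = ['\n'] from rfl, this, pv_splitOn_eq]
    simp
  rw [h2, pv_outerA]
  rw [show (pvSplit (· == '\n') (PySem.Chars.strip s.toList)).flatMap (pvSplit (· == ','))
        = pvSplit (fun c => (c == '\n') || (c == ',')) (PySem.Chars.strip s.toList)
      from pv_flatMap_split _ _ _]
  rw [show (fun c => (c == '\n') || (c == ',')) = pvIsD from rfl]
  rw [pv_strip_toks]
  simp

-- ===== VERDICT (by name: the statement is the Claim_ definition above) =====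
theorem parse_models_input_spec : Claim_equal_parse_models_input := by
  intro s _
  unfold Spec_parse_models_input
  rw [pv_a_eq, pv_alt_eq]
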